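-- pv_equiv track=rewrite | github.com/kungfu-kenny/MeetingSite | models/model_gender.py | produce_gender_search_manually
-- ===== SOURCE A (Python) =====
-- def produce_gender_search_manually(value_text:str) -> int:
--     """
--     Method which is dedicated to produce values from the
--     Input:  value_text = text about the user
--     Output: we developed value of the id to which gender of it
--     """
--     value_male = ['he', 'him', 'his']
--     value_female = ['she', 'her', 'hers']
--     value_text = [''.join(e for e in f if e.isalnum()).lower() for f in value_text.split()]
--     count_male = sum([value_text.count(f) for f in value_male])
--     count_female = sum([value_text.count(f) for f in value_female])
--     if count_male > count_female:
--         return 'Male'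
--     elif count_male < count_female:
--         return 'Female'
--     return 'Unknown'
-- ===== SOURCE B (Python) =====
-- def produce_gender_search_manually(value_text: str) -> int:
--     value_male = {'he', 'him', 'his'}
--     value_female = {'she', 'her', 'hers'}
--     count_male = 0
--     count_female = 0
--     for f in value_text.split():
--         w = ''.join(e for e in f if e.isalnum()).lower()
--         if w in value_male:
--             count_male += 1
--         elif w in value_female:
--             count_female += 1
--     if count_male > count_female:
--         return 'Male'
--     if count_female > count_male:
--         return 'Female'
--     return 'Unknown'
-- ===== Notes on version B (the rewrite author's own statement) =====
-- stated objective: alternative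
-- what changed: Replaces A's build-normalized-list-then-six-count-scans structure with a single pass over the words that classifies each normalized word by set membership and accumulates the two counters directly.
import Mathlib
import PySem

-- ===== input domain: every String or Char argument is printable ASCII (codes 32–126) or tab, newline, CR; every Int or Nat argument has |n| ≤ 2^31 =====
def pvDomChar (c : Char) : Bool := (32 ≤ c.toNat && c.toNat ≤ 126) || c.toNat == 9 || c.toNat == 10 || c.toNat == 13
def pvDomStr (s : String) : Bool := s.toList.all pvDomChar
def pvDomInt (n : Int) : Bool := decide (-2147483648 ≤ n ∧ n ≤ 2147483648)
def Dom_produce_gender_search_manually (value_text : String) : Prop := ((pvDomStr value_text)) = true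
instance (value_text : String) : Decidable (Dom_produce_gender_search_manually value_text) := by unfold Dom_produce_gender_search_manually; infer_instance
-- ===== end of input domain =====

-- B replaces A's normalized-list-then-six-count-scans structure with one pass over the
-- words, classifying each normalized word by set membership and accumulating two counters.

-- ===== PORT A =====
-- ''.join(e for e in f if e.isalnum()).lower()
def pvNormalize (f : String) : List Char :=
  PySem.Chars.lower (f.toList.filter (fun e => PySem.Chars.isalnum e))

def produce_gender_search_manually (value_text : String) : String :=
  let value_male : List (List Char) := [['h','e'], ['h','i','m'], ['h','i','s']]
  let value_female : List (List Char) := [['s','h','e'], ['h','e','r'], ['h','e','r','s']]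
  let vt : List (List Char) := (PySem.Str.split₀ value_text).map pvNormalize
  let count_male : Nat := (value_male.map (fun f => PySem.List.count vt f)).sum
  let count_female : Nat := (value_female.map (fun f => PySem.List.count vt f)).sum
  if count_male > count_female then "Male"
  else if count_male < count_female then "Female"
  else "Unknown"

-- ===== PORT B =====
def pvMaleSet : PySem.Set (List Char) :=
  PySem.Set.ofList [['h','e'], ['h','i','m'], ['h','i','s']]
def pvFemaleSet : PySem.Set (List Char) :=
  PySem.Set.ofList [['s','h','e'], ['h','e','r'], ['h','e','r','s']]

def pvStep (acc : Nat × Nat) (f : String) : Nat × Nat :=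
  let w := pvNormalize f
  if pvMaleSet.contains w then (acc.1 + 1, acc.2)
  else if pvFemaleSet.contains w then (acc.1, acc.2 + 1)
  else acc

def produce_gender_search_manually_alt (value_text : String) : String :=
  let counts := (PySem.Str.split₀ value_text).foldl pvStep (0, 0)
  if counts.1 > counts.2 then "Male"
  else if counts.2 > counts.1 then "Female"
  else "Unknown"

-- ===== PRECONDITION & SPEC =====
def Spec_produce_gender_search_manually (value_text : String) (out : String) : Prop := out = produce_gender_search_manually_alt value_text
instance (value_text : String) (out : String) : Decidable (Spec_produce_gender_search_manually value_text out) := by unfold Spec_produce_gender_search_manually; infer_instance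

-- ===== CLAIM (what is proved, stated in full; the proofs are below) =====
def Claim_equal_produce_gender_search_manually : Prop := ∀ (value_text : String), Dom_produce_gender_search_manually value_text → Spec_produce_gender_search_manually value_text (produce_gender_search_manually value_text)

-- ===== LEMMAS AND PROOFS =====

-- B's single-pass loop counts exactly A's six pronoun counts.
theorem pv_loop (ws : List String) (m f : Nat) :
    ws.foldl pvStep (m, f) =
      (m + ((ws.map pvNormalize).count ['h','e'] + (ws.map pvNormalize).count ['h','i','m']
            + (ws.map pvNormalize).count ['h','i','s']),
       f + ((ws.map pvNormalize).count ['s','h','e'] + (ws.map pvNormalize).count ['h','e','r']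
            + (ws.map pvNormalize).count ['h','e','r','s'])) := by
  induction ws generalizing m f with
  | nil => simp
  | cons w ws ih =>
    simp only [List.foldl_cons, List.map_cons, List.count_cons]
    rw [pvStep]
    by_cases h1 : pvNormalize w = ['h','e']
    · simp [h1, ih, pvMaleSet, PySem.Set.ofList]; omega
    · by_cases h2 : pvNormalize w = ['h','i','m']
      · simp [h2, ih, pvMaleSet, PySem.Set.ofList]; omega
      · by_cases h3 : pvNormalize w = ['h','i','s']
        · simp [h3, ih, pvMaleSet, PySem.Set.ofList]; omega
        · by_cases h4 : pvNormalize w = ['s','h','e']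
          · simp [h4, ih, pvMaleSet, pvFemaleSet, PySem.Set.ofList]; omega
          · by_cases h5 : pvNormalize w = ['h','e','r']
            · simp [h5, ih, pvMaleSet, pvFemaleSet, PySem.Set.ofList]; omega
            · by_cases h6 : pvNormalize w = ['h','e','r','s']
              · simp [h6, ih, pvMaleSet, pvFemaleSet, PySem.Set.ofList]; omega
              · simp [pvMaleSet, pvFemaleSet, PySem.Set.ofList, h1, h2, h3, h4, h5, h6, ih]

-- ===== VERDICT (by name: the statement is the Claim_ definition above) =====
theorem produce_gender_search_manually_spec : Claim_equal_produce_gender_search_manually := by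
  intro value_text _
  unfold Spec_produce_gender_search_manually
  unfold produce_gender_search_manually produce_gender_search_manually_alt
  rw [pv_loop]
  simp [PySem.List.count_eq, Nat.add_assoc]
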